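-- pv_equiv track=rewrite | github.com/roberthsu2003/vibe_coding | 演示目錄/專案範例3/3performance.py | calculate_factorial_slow
-- ===== SOURCE A (Python) =====
-- def calculate_factorial_slow(n):
--     """計算階乘，但每次都重新計算"""
--     def factorial(x):
--         if x <= 1:
--             return 1
--         return x * factorial(x - 1)
--
--     result = []
--     for i in range(n):
--         # 每次都重新計算 factorial(10)
--         result.append(factorial(10) + i)
--     return result
-- ===== SOURCE B (Python) =====
-- def calculate_factorial_slow(n):
--     """計算階乘，但每次都重新計算"""
--     f = 1
--     for x in range(2, 11):
--         f *= x
--     return list(range(f, f + n))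
-- ===== Notes on version B (the rewrite author's own statement) =====
-- stated objective: faster
-- what changed: B computes factorial(10) once with an iterative product over range(2,11) instead of a fresh recursive computation per element, and emits the arithmetic sequence as list(range(f, f+n)) instead of an append loop.
import Mathlib
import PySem

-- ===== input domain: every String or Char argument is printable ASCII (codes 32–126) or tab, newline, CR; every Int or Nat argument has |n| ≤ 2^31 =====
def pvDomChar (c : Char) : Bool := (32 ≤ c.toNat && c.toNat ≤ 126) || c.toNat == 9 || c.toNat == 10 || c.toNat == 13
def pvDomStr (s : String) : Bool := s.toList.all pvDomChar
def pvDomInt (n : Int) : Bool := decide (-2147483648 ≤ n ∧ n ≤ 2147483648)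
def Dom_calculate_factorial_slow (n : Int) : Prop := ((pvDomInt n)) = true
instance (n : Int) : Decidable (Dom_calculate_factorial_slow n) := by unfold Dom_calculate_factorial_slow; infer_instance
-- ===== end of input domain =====

-- B computes factorial(10) once by an iterative product and returns list(range(f, f+n)); A recomputes factorial(10) recursively for every element.

-- ===== PORT A =====
-- inner recursive helper: factorial(x)
def pvFactorialA (x : Int) : Int :=
  if x ≤ 1 then 1 else x * pvFactorialA (x - 1)
termination_by x.toNat
decreasing_by omega

def calculate_factorial_slow (n : Int) : List Int :=
  (PySem.List.pyRange 0 n 1).foldl (fun result i => result ++ [pvFactorialA 10 + i]) []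

-- ===== PORT B =====
def calculate_factorial_slow_alt (n : Int) : List Int :=
  let f := (PySem.List.pyRange 2 11 1).foldl (fun acc x => acc * x) 1
  PySem.List.pyRange f (f + n) 1

-- ===== PRECONDITION & SPEC =====
def Spec_calculate_factorial_slow (n : Int) (out : List Int) : Prop := out = calculate_factorial_slow_alt n
instance (n : Int) (out : List Int) : Decidable (Spec_calculate_factorial_slow n out) := by unfold Spec_calculate_factorial_slow; infer_instance

-- ===== CLAIM (what is proved, stated in full; the proofs are below) =====
def Claim_equal_calculate_factorial_slow : Prop := ∀ (n : Int), Dom_calculate_factorial_slow n → Spec_calculate_factorial_slow n (calculate_factorial_slow n)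

-- ===== LEMMAS AND PROOFS =====

theorem pvFactStep (x : Int) (hx : ¬ x ≤ 1) : pvFactorialA x = x * pvFactorialA (x - 1) := by
  rw [pvFactorialA]; simp [hx]

theorem pvFactorialA_ten : pvFactorialA 10 = 3628800 := by
  rw [pvFactStep 10 (by norm_num)]; norm_num
  rw [pvFactStep 9 (by norm_num)]; norm_num
  rw [pvFactStep 8 (by norm_num)]; norm_num
  rw [pvFactStep 7 (by norm_num)]; norm_num
  rw [pvFactStep 6 (by norm_num)]; norm_num
  rw [pvFactStep 5 (by norm_num)]; norm_num
  rw [pvFactStep 4 (by norm_num)]; norm_num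
  rw [pvFactStep 3 (by norm_num)]; norm_num
  rw [pvFactStep 2 (by norm_num)]; norm_num
  rw [pvFactorialA]; norm_num

theorem pvProdB : (PySem.List.pyRange 2 11 1).foldl (fun acc x => acc * x) 1 = 3628800 := by decide

-- ===== VERDICT (by name: the statement is the Claim_ definition above) =====
theorem calculate_factorial_slow_spec : Claim_equal_calculate_factorial_slow := by
  intro n _
  unfold Spec_calculate_factorial_slow calculate_factorial_slow calculate_factorial_slow_alt
  rw [pvProdB, pvFactorialA_ten,
    PySem.List.foldl_append_singleton_eq_map,
    PySem.List.pyRange_one 0 n, PySem.List.pyRange_one 3628800 (3628800 + n)]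
  simp [List.map_map, Function.comp]
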